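-- pv_equiv track=rewrite | github.com/c12i/lc | 1800-concatenation-of-consecutive-binary-numbers/2025-08-15 11.49.30 - Accepted - runtime 506ms - memory 15.6MB.py | concatenatedBinary
-- ===== SOURCE A (Python) =====
-- def concatenatedBinary(n):
--     """
--     :type n: int
--     :rtype: int
--     """
--     MOD = 10**9 + 7
--     num = 0
--     bit_len = 0
--
--     for d in range(1, n + 1):
--         # increase bit length if d is power of 2
--         if d & (d - 1) == 0:
--             bit_len += 1
--         num = ((num << bit_len) | d) % MOD
--
--     return num
-- ===== SOURCE B (Python) =====
-- def concatenatedBinary(n):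
--     """
--     :type n: int
--     :rtype: int
--     """
--     MOD = 10**9 + 7
--     acc = 0
--     m = 1
--     # walk n..1 back-to-front: d contributes d * 2^(bits after d); the weight m
--     # is maintained incrementally instead of tracking bit_len with a power test
--     for d in range(n, 0, -1):
--         acc = (acc + d * m) % MOD
--         m = (m * (1 << d.bit_length())) % MOD
--     return acc
-- ===== Notes on version B (the rewrite author's own statement) =====
-- stated objective: alternative
-- what changed: A builds the answer front-to-back with a Horner step (power-of-two test maintaining bit_len, shift-or each value in); B walks n..1 back-to-front and sums d times an incrementally maintained weight 2^(bits after d) mod p, using d.bit_length() instead of the power-of-two test.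
import Mathlib
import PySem

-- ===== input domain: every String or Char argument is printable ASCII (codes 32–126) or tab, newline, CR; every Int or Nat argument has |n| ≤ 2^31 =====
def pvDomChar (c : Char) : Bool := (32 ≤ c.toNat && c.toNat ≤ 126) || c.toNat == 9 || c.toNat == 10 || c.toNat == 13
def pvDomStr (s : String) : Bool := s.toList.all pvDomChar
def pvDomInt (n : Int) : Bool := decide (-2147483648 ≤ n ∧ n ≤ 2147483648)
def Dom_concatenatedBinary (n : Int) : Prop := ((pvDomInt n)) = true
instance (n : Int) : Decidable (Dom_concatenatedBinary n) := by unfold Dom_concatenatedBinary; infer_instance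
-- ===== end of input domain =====

-- B replaces A's forward Horner pass (power-of-two test updating bit_len, shift-or, mod)
-- by a back-to-front weighted sum: d contributes d times the running weight 2^(bits after d)
-- mod p; objective: alternative (same O(n) cost, different mechanism).

-- ===== PORT A =====
-- MOD = 10**9 + 7 (the literal both Pythons define)
def pvMOD : Int := 10 ^ 9 + 7

-- loop body of A; bit_len is a nonnegative Python int only ever used as a shift amount, carried as Nat
def pvStepA (st : Int × Nat) (d : Int) : Int × Nat :=
  let bit_len := if PySem.Int.band d (d - 1) = 0 then st.2 + 1 else st.2
  (PySem.Int.mod (PySem.Int.bor (st.1 <<< ((bit_len : Nat) : Int)) d) pvMOD, bit_len)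

def concatenatedBinary (n : Int) : Int :=
  ((PySem.List.pyRange 1 (n + 1) 1).foldl pvStepA (0, 0)).1

-- ===== PORT B =====
-- loop body of B: acc = (acc + d*m) % MOD; m = (m * (1 << d.bit_length())) % MOD
def pvStepB (st : Int × Int) (d : Int) : Int × Int :=
  (PySem.Int.mod (st.1 + d * st.2) pvMOD,
   PySem.Int.mod (st.2 * ((1 : Int) <<< ((PySem.Int.bitLength d : Nat) : Int))) pvMOD)

def concatenatedBinary_alt (n : Int) : Int :=
  ((PySem.List.pyRange n 0 (-1)).foldl pvStepB (0, 1)).1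

-- ===== PRECONDITION & SPEC =====
def Spec_concatenatedBinary (n : Int) (out : Int) : Prop := out = concatenatedBinary_alt n
instance (n : Int) (out : Int) : Decidable (Spec_concatenatedBinary n out) := by unfold Spec_concatenatedBinary; infer_instance

-- ===== CLAIM (what is proved, stated in full; the proofs are below) =====
def Claim_equal_concatenatedBinary : Prop := ∀ (n : Int), Dom_concatenatedBinary n → Spec_concatenatedBinary n (concatenatedBinary n)

-- ===== LEMMAS AND PROOFS =====

-- exact (unreduced) value of the concatenation of the binaries of 1..d
def pvN : Nat → Int
  | 0 => 0
  | d + 1 => pvN d * 2 ^ Nat.size (d + 1) + (d + 1 : Nat)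

theorem pvMOD_pos : (0 : Int) < pvMOD := by norm_num [pvMOD]

theorem pv_land_pred_pow (k : Nat) : 2 ^ k &&& (2 ^ k - 1) = 0 := by
  apply Nat.eq_of_testBit_eq; intro i
  simp only [Nat.testBit_and, Nat.testBit_two_pow, Nat.testBit_two_pow_sub_one, Nat.zero_testBit,
    Bool.and_eq_false_iff, decide_eq_false_iff_not]
  omega

theorem pv_pow_of_land_pred {m : Nat} (h1 : 1 ≤ m) (h : m &&& (m - 1) = 0) :
    m = 2 ^ (Nat.size m - 1) := by
  by_contra hne
  have hpos : 0 < Nat.size m := Nat.size_pos.mpr h1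
  have hs1 : 2 ^ (Nat.size m - 1) ≤ m := Nat.lt_size.mp (by omega)
  have hlt : m < 2 ^ (Nat.size m) := Nat.lt_size_self m
  have hsz : Nat.size m = (Nat.size m - 1) + 1 := by omega
  rw [hsz] at hlt
  have hm : 2 ^ (Nat.size m - 1) < m := lt_of_le_of_ne hs1 (fun e => hne e.symm)
  have hb1 : Nat.testBit m (Nat.size m - 1) = true :=
    Nat.testBit_of_two_pow_le_and_two_pow_add_one_gt hs1 hlt
  have hb2 : Nat.testBit (m - 1) (Nat.size m - 1) = true :=
    Nat.testBit_of_two_pow_le_and_two_pow_add_one_gt (by omega) (by omega)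
  have hz := congrArg (fun x => Nat.testBit x (Nat.size m - 1)) h
  simp only [Nat.testBit_and, hb1, hb2, Nat.zero_testBit, Bool.and_self] at hz
  exact absurd hz (by simp)

theorem pv_size_two_pow_sub_one (k : Nat) : Nat.size (2 ^ k - 1) = k := by
  rcases Nat.eq_zero_or_pos k with h | h
  · subst h; simp
  · have hk : (2 : Nat) ^ (k - 1) < 2 ^ k := Nat.pow_lt_pow_right (by norm_num) (by omega)
    have hp0 : 0 < (2 : Nat) ^ k := by positivity
    have h1 : Nat.size (2 ^ k - 1) ≤ k := Nat.size_le.mpr (by omega)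
    have h2 := Nat.lt_size.mpr (show 2 ^ (k - 1) ≤ 2 ^ k - 1 by omega)
    omega

theorem pv_size_pred_of_not_pow {m : Nat} (h1 : 1 ≤ m) (hne : m ≠ 2 ^ (Nat.size m - 1)) :
    Nat.size (m - 1) = Nat.size m := by
  have hpos : 0 < Nat.size m := Nat.size_pos.mpr h1
  have hs1 : 2 ^ (Nat.size m - 1) ≤ m := Nat.lt_size.mp (by omega)
  have hm : 2 ^ (Nat.size m - 1) < m := lt_of_le_of_ne hs1 (fun e => hne e.symm)
  have h2 := Nat.lt_size.mpr (show 2 ^ (Nat.size m - 1) ≤ m - 1 by omega)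
  have h3 : Nat.size (m - 1) ≤ Nat.size m := Nat.size_le_size (by omega)
  omega

-- Python's bit_length on a natural number is Nat.size
theorem pv_bitLength_eq_size (m : Nat) : PySem.Int.bitLength (m : Int) = Nat.size m := by
  rcases Nat.eq_zero_or_pos m with h | h
  · subst h; simp [PySem.Int.bitLength_zero]
  · have hm : ((m : Int)).natAbs = m := Int.natAbs_natCast m
    have hub := PySem.Int.lt_two_pow_bitLength (m : Int)
    have hlb := PySem.Int.two_pow_bitLength_le (m : Int) (by exact_mod_cast h.ne')
    rw [hm] at hub hlb
    have hu : Nat.size m ≤ PySem.Int.bitLength (m : Int) := Nat.size_le.mpr hub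
    have hl := Nat.lt_size.mpr hlb
    rcases Nat.eq_zero_or_pos (PySem.Int.bitLength (m : Int)) with h0 | h0
    · have := Nat.size_pos.mpr h; omega
    · omega

-- modular absorption: ((a % p) + (b % p) * c) % p = (a + b * c) % p
theorem pv_emod_absorb (a b c p : Int) : ((a % p) + (b % p) * c) % p = (a + b * c) % p := by
  rw [Int.add_emod, Int.mul_emod, Int.emod_emod_of_dvd _ dvd_rfl,
    Int.emod_emod_of_dvd _ dvd_rfl, ← Int.mul_emod, ← Int.add_emod]

-- Nat.size (d+1) updates exactly as A's bit_len does
theorem pv_size_update (d : Nat) :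
    Nat.size (d + 1) = (if (d + 1) &&& d = 0 then Nat.size d + 1 else Nat.size d) := by
  split_ifs with hp
  · have hpow := pv_pow_of_land_pred (m := d + 1) (by omega) (by simpa using hp)
    set k := Nat.size (d + 1) - 1 with hk
    have hs : Nat.size (d + 1) = k + 1 := by
      have := Nat.size_pos.mpr (show 0 < d + 1 by omega); omega
    have h1k : 1 ≤ 2 ^ k := Nat.one_le_two_pow
    have hd : d = 2 ^ k - 1 := by omega
    rw [hd, show 2 ^ k - 1 + 1 = 2 ^ k from by omega, Nat.size_pow, pv_size_two_pow_sub_one]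
  · by_cases he : d + 1 = 2 ^ (Nat.size (d + 1) - 1)
    · exact absurd (by rw [he]; simpa [show (2 : Nat) ^ (Nat.size (d + 1) - 1) - 1 = d from by omega,
        ← he] using pv_land_pred_pow (Nat.size (d + 1) - 1)) hp
    · have := pv_size_pred_of_not_pow (show 1 ≤ d + 1 by omega) he
      simpa using this.symm

-- the shift-or-mod of A is multiply-add-mod (its or is on disjoint bits)
theorem pv_num_step (x : Int) (hx : 0 ≤ x) (d : Nat) :
    PySem.Int.mod (PySem.Int.bor (x <<< ((Nat.size (d + 1) : Nat) : Int)) ((d + 1 : Nat) : Int)) pvMOD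
      = (x * 2 ^ Nat.size (d + 1) + (d + 1 : Nat)) % pvMOD := by
  rw [PySem.Int.mod_eq_emod_of_pos pvMOD_pos, Int.shiftLeft_eq_mul_pow,
    PySem.Int.bor_of_nonneg (by positivity) (by positivity)]
  have ht : (x * ((2 ^ Nat.size (d + 1) : Nat) : Int)).toNat = x.toNat * 2 ^ Nat.size (d + 1) := by
    conv_lhs => rw [← Int.toNat_of_nonneg hx]
    push_cast
    exact_mod_cast rfl
  rw [ht, Int.toNat_natCast, mul_comm x.toNat, ← Nat.two_pow_add_eq_or_of_lt (Nat.lt_size_self (d + 1))]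
  push_cast [Int.toNat_of_nonneg hx]
  ring_nf

theorem pv_stepA_eq (d : Nat) :
    pvStepA (pvN d % pvMOD, Nat.size d) (((d + 1 : Nat) : Int)) =
      (pvN (d + 1) % pvMOD, Nat.size (d + 1)) := by
  unfold pvStepA
  have hc : (((d + 1 : Nat) : Int)) - 1 = ((d : Nat) : Int) := by push_cast; ring
  have hband : PySem.Int.band ((d + 1 : Nat) : Int) (((d + 1 : Nat) : Int) - 1) = (((d + 1) &&& d : Nat) : Int) := by
    rw [hc, PySem.Int.band_natCast]
  simp only [hband]
  have hbl : (if (((d + 1) &&& d : Nat) : Int) = 0 then Nat.size d + 1 else Nat.size d) = Nat.size (d + 1) := by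
    rw [pv_size_update d]
    split_ifs with h1 h2 h2 <;>
      first | rfl | (exact absurd (by exact_mod_cast h1) h2) | (exact absurd (by exact_mod_cast h2) h1)
  simp only [hbl]
  have hnx : 0 ≤ pvN d % pvMOD := Int.emod_nonneg _ (by norm_num [pvMOD])
  rw [pv_num_step _ hnx d, Prod.mk.injEq]
  refine ⟨?_, rfl⟩
  conv_rhs => rw [show pvN (d + 1) = pvN d * 2 ^ Nat.size (d + 1) + ((d + 1 : Nat) : Int) from rfl]
  exact Int.ModEq.add_right _ (Int.ModEq.mul_right _ (Int.emod_emod_of_dvd _ dvd_rfl))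

theorem pv_foldA (d : Nat) :
    (PySem.List.pyRange 1 ((d : Int) + 1) 1).foldl pvStepA (0, 0) =
      (pvN d % pvMOD, Nat.size d) := by
  induction d with
  | zero => rw [PySem.List.pyRange_one_eq_nil (by norm_num)]; simp [pvN]
  | succ d ih =>
    have hcast : ((d + 1 : Nat) : Int) + 1 = ((d : Int) + 1) + 1 := by push_cast; ring
    rw [hcast, PySem.List.pyRange_one_succ_right (by omega), List.foldl_append, ih,
      List.foldl_cons, List.foldl_nil,
      show (d : Int) + 1 = ((d + 1 : Nat) : Int) from by push_cast; ring, pv_stepA_eq]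

theorem pv_foldB (d : Nat) (acc m : Int) :
    ((PySem.List.pyRange (d : Int) 0 (-1)).foldl pvStepB (acc, m)).1 % pvMOD =
      (acc + m * pvN d) % pvMOD := by
  induction d generalizing acc m with
  | zero => rw [PySem.List.pyRange_neg_one_eq_nil (by norm_num)]; simp [pvN]
  | succ d ih =>
    rw [PySem.List.pyRange_neg_one_cons (by positivity),
      show ((d + 1 : Nat) : Int) - 1 = (d : Int) from by push_cast; ring,
      List.foldl_cons]
    rw [show pvStepB (acc, m) ((d + 1 : Nat) : Int) =
        (PySem.Int.mod (acc + ((d + 1 : Nat) : Int) * m) pvMOD,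
         PySem.Int.mod (m * ((1 : Int) <<< ((PySem.Int.bitLength ((d + 1 : Nat) : Int) : Nat) : Int))) pvMOD) from rfl,
      ih]
    rw [PySem.Int.mod_eq_emod_of_pos pvMOD_pos, PySem.Int.mod_eq_emod_of_pos pvMOD_pos,
      pv_bitLength_eq_size (d + 1), Int.one_shiftLeft, pv_emod_absorb]
    congr 1
    rw [show pvN (d + 1) = pvN d * 2 ^ Nat.size (d + 1) + ((d + 1 : Nat) : Int) from rfl]
    push_cast
    ring

theorem pv_foldB_reduced_aux (t : List Int) : ∀ (x : Int) (st : Int × Int),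
    ((x :: t).foldl pvStepB st).1 % pvMOD = ((x :: t).foldl pvStepB st).1 := by
  induction t with
  | nil =>
    intro x st
    simp only [List.foldl_cons, List.foldl_nil]
    rw [show (pvStepB st x).1 = PySem.Int.mod (st.1 + x * st.2) pvMOD from rfl,
      PySem.Int.mod_eq_emod_of_pos pvMOD_pos]
    exact Int.emod_emod_of_dvd _ dvd_rfl
  | cons y t' ih =>
    intro x st
    rw [show ((x :: y :: t').foldl pvStepB st) = ((y :: t').foldl pvStepB (pvStepB st x)) from rfl]
    exact ih y (pvStepB st x)

theorem pv_foldB_reduced (l : List Int) (st : Int × Int) (hl : l ≠ []) :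
    (l.foldl pvStepB st).1 % pvMOD = (l.foldl pvStepB st).1 := by
  match l with
  | x :: t => exact pv_foldB_reduced_aux t x st

-- ===== VERDICT (by name: the statement is the Claim_ definition above) =====
theorem concatenatedBinary_spec : Claim_equal_concatenatedBinary := by
  intro n _
  unfold Spec_concatenatedBinary concatenatedBinary concatenatedBinary_alt
  by_cases hn : n ≤ 0
  · rw [PySem.List.pyRange_one_eq_nil (by omega), PySem.List.pyRange_neg_one_eq_nil hn]
    rfl
  · push Not at hn
    obtain ⟨d, rfl⟩ : ∃ d : Nat, n = (d : Int) := ⟨n.toNat, (Int.toNat_of_nonneg (by omega)).symm⟩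
    have hd : 1 ≤ d := by exact_mod_cast hn
    have hne : PySem.List.pyRange (d : Int) 0 (-1) ≠ [] := by
      rw [PySem.List.pyRange_neg_one_cons (by exact_mod_cast hd)]; simp
    rw [pv_foldA d]
    have h1 := pv_foldB d 0 1
    have h2 := pv_foldB_reduced _ (0, 1) hne
    rw [h2] at h1
    rw [h1]; ring_nf
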